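-- pv_equiv track=rewrite | github.com/Optophys-Lab/FreiBox | FreiBox_GUI/Plot_progress_moving_window.py | get_lick_block_types
-- ===== SOURCE A (Python) =====
-- def get_lick_block_types(licking_BlockType_list):
--     list_of_lick_blocks = []
--     list_of_lick_blocks_x = [1]
--     first_bl = licking_BlockType_list[0]
--     if first_bl == 1:
--         list_of_lick_blocks.append('left')
--     else:
--         list_of_lick_blocks.append('right')
--     if len(licking_BlockType_list) > 1:
--         for index, value in enumerate(licking_BlockType_list):
--             if index > 0:
--
--                 if value != licking_BlockType_list[index-1]:
--                     list_of_lick_blocks_x.append(index)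
--                     corr_side_this_block =value
--                     if corr_side_this_block == 1:
--                         corr_side_this_block_transl = 'left'
--                     else:
--                         corr_side_this_block_transl = 'right'
--                     list_of_lick_blocks.append(corr_side_this_block_transl)
--     return list_of_lick_blocks, list_of_lick_blocks_x
-- ===== SOURCE B (Python) =====
-- def get_lick_block_types(licking_BlockType_list):
--     # Two-pointer run scan: jump from run start to run start instead of
--     # comparing every element with its predecessor.
--     labels = []
--     xs = []
--     n = len(licking_BlockType_list)
--     i = 0
--     while i < n:
--         v = licking_BlockType_list[i]
--         labels.append('left' if v == 1 else 'right')
--         xs.append(1 if i == 0 else i)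
--         j = i + 1
--         while j < n and licking_BlockType_list[j] == v:
--             j += 1
--         i = j
--     return labels, xs
-- ===== Notes on version B (the rewrite author's own statement) =====
-- stated objective: alternative
-- what changed: Replaces A's single enumerate loop that compares each element with its predecessor by a two-pointer run scan that jumps from one run start to the next, emitting one (label, x) pair per run.
import Mathlib
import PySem

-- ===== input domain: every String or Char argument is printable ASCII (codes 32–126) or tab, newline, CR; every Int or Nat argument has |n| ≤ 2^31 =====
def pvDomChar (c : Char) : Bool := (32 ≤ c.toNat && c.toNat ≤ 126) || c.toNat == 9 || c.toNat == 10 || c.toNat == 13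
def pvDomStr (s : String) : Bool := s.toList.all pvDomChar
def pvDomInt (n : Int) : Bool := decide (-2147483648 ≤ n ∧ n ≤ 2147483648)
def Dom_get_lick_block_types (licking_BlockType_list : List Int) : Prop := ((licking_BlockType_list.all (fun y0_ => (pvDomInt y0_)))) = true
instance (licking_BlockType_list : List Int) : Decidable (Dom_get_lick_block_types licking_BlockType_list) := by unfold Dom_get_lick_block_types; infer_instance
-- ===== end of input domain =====

-- B replaces A's predecessor-comparison loop by a two-pointer run scan (alternative decomposition, same cost).

-- ===== PORT A =====
-- A reads licking_BlockType_list[0] first, so it raises IndexError on []; the [] branch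
-- below is unreachable under Pre_. 'l[index-1]' is ported with pyGetD: index > 0 and
-- index < len, so the access is always in range and pyGetD is exact there.
def get_lick_block_types (licking_BlockType_list : List Int) : List String × List Int :=
  match licking_BlockType_list with
  | [] => ([], [1])
  | first_bl :: _ =>
    let list_of_lick_blocks : List String := [if first_bl = 1 then "left" else "right"]
    let list_of_lick_blocks_x : List Int := [1]
    if licking_BlockType_list.length > 1 then
      (PySem.List.enumerate licking_BlockType_list 0).foldl
        (fun (st : List String × List Int) iv =>
          if iv.1 > 0 then
            if iv.2 ≠ PySem.List.pyGetD licking_BlockType_list (iv.1 - 1) 0 then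
              (st.1 ++ [if iv.2 = 1 then "left" else "right"], st.2 ++ [iv.1])
            else st
          else st)
        (list_of_lick_blocks, list_of_lick_blocks_x)
    else (list_of_lick_blocks, list_of_lick_blocks_x)

-- ===== PORT B =====
-- inner 'while j < n and l[j] == v: j += 1' of Source B
def skipRun (l : List Int) (v : Int) (j : Nat) : Nat :=
  if h : j < l.length ∧ l.getD j 0 = v then skipRun l v (j + 1) else j
termination_by l.length - j
decreasing_by omega

theorem skipRun_ge (l : List Int) (v : Int) (j : Nat) : j ≤ skipRun l v j := by
  unfold skipRun
  split
  · exact le_trans (Nat.le_succ j) (skipRun_ge l v (j + 1))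
  · exact le_refl j
termination_by l.length - j
decreasing_by omega

-- outer while loop of Source B, one step per run
def altGo (l : List Int) (i : Nat) : List String × List Int :=
  if h : i < l.length then
    let v := l.getD i 0
    let p := altGo l (skipRun l v (i + 1))
    ((if v = 1 then "left" else "right") :: p.1, (if i = 0 then 1 else (i : Int)) :: p.2)
  else ([], [])
termination_by l.length - i
decreasing_by have := skipRun_ge l (l.getD i 0) (i + 1); omega

def get_lick_block_types_alt (licking_BlockType_list : List Int) : List String × List Int :=
  altGo licking_BlockType_list 0

-- ===== PRECONDITION & SPEC =====
-- Pre_ excludes only the empty list, on which A raises IndexError.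
def Pre_get_lick_block_types (licking_BlockType_list : List Int) : Prop :=
  licking_BlockType_list ≠ []
instance (licking_BlockType_list : List Int) : Decidable (Pre_get_lick_block_types licking_BlockType_list) := by unfold Pre_get_lick_block_types; infer_instance

def pvWitness_get_lick_block_types : List Int := [1, 1, 2, 2, 1]

def Spec_get_lick_block_types (licking_BlockType_list : List Int) (out : List String × List Int) : Prop := out = get_lick_block_types_alt licking_BlockType_list
instance (licking_BlockType_list : List Int) (out : List String × List Int) : Decidable (Spec_get_lick_block_types licking_BlockType_list out) := by unfold Spec_get_lick_block_types; infer_instance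

-- ===== CLAIM (what is proved, stated in full; the proofs are below) =====
def Claim_equal_get_lick_block_types : Prop := ∀ (licking_BlockType_list : List Int), Dom_get_lick_block_types licking_BlockType_list → Pre_get_lick_block_types licking_BlockType_list → Spec_get_lick_block_types licking_BlockType_list (get_lick_block_types licking_BlockType_list)

-- ===== LEMMAS AND PROOFS =====

-- A's loop body, named for the proofs
def aStep (l : List Int) (st : List String × List Int) (iv : Int × Int) : List String × List Int :=
  if iv.1 > 0 then
    if iv.2 ≠ PySem.List.pyGetD l (iv.1 - 1) 0 then
      (st.1 ++ [if iv.2 = 1 then "left" else "right"], st.2 ++ [iv.1])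
    else st
  else st

-- what A's loop produces on a suffix of the enumerated list, built front-to-back
def aP (l : List Int) : List (Int × Int) → List String × List Int
  | [] => ([], [])
  | iv :: es =>
    if iv.1 > 0 then
      if iv.2 ≠ PySem.List.pyGetD l (iv.1 - 1) 0 then
        ((if iv.2 = 1 then "left" else "right") :: (aP l es).1, iv.1 :: (aP l es).2)
      else aP l es
    else aP l es

-- A's predecessor-comparison recursion, carrying the previous value explicitly
def aRun (l : List Int) (prev : Int) (j : Nat) : List String × List Int :=
  if h : j < l.length then
    if l.getD j 0 ≠ prev then
      let p := aRun l (l.getD j 0) (j + 1)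
      ((if l.getD j 0 = 1 then "left" else "right") :: p.1, (j : Int) :: p.2)
    else aRun l prev (j + 1)
  else ([], [])
termination_by l.length - j
decreasing_by all_goals omega

theorem foldl_aStep (l : List Int) (es : List (Int × Int)) :
    ∀ acc : List String × List Int,
      es.foldl (aStep l) acc = (acc.1 ++ (aP l es).1, acc.2 ++ (aP l es).2) := by
  induction es with
  | nil => intro acc; simp [aP]
  | cons iv es ih =>
    intro acc
    simp only [List.foldl_cons, aP, aStep]
    split
    · split
      · rw [ih]; simp
      · rw [ih]
    · rw [ih]

theorem aP_drop (l : List Int) (j : Nat) (hj : 1 ≤ j) :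
    aP l ((PySem.List.enumerate l 0).drop j) = aRun l (l.getD (j - 1) 0) j := by
  by_cases h : j < l.length
  · have hlen : j < (PySem.List.enumerate l 0).length := by
      rw [PySem.List.length_enumerate]; exact h
    rw [List.drop_eq_getElem_cons hlen, PySem.List.getElem_enumerate]
    have hidx : ((0 : Int) + (j : Int)) = (j : Int) := by omega
    simp only [aP, hidx]
    rw [aP_drop l (j + 1) (by omega)]
    have hpos : ((j : Int) > 0) := by exact_mod_cast hj
    rw [if_pos hpos]
    have hsub : ((j : Int) - 1) = ((j - 1 : Nat) : Int) := by omega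
    rw [hsub, PySem.List.pyGetD_natCast]
    have hget : l[j] = l.getD j 0 := (List.getD_eq_getElem l 0 h).symm
    rw [hget]
    conv_rhs => rw [aRun]
    rw [dif_pos h]
    simp only [Nat.add_sub_cancel]
    split
    · rfl
    · next hne => rw [not_not] at hne; rw [hne]
  · have h1 : (PySem.List.enumerate l 0).length ≤ j := by
      rw [PySem.List.length_enumerate]; omega
    rw [List.drop_of_length_le h1]
    rw [aRun, dif_neg h]
    rfl
termination_by l.length - j
decreasing_by omega

theorem aRun_eq_altGo (l : List Int) (v : Int) (j : Nat) (hj : 1 ≤ j) :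
    aRun l v j = altGo l (skipRun l v j) := by
  by_cases h : j < l.length
  · by_cases he : l.getD j 0 = v
    · rw [aRun, dif_pos h, if_neg (not_not_intro he)]
      rw [skipRun, dif_pos ⟨h, he⟩]
      exact aRun_eq_altGo l v (j + 1) (by omega)
    · rw [skipRun, dif_neg (fun hc => he hc.2)]
      rw [aRun, dif_pos h, if_pos he]
      conv_rhs => rw [altGo]
      rw [dif_pos h]
      have hne : j ≠ 0 := by omega
      simp only [if_neg hne]
      rw [aRun_eq_altGo l (l.getD j 0) (j + 1) (by omega)]
  · rw [skipRun, dif_neg (fun hc => h hc.1)]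
    rw [aRun, dif_neg h, altGo, dif_neg h]
termination_by l.length - j
decreasing_by all_goals omega

theorem main_eq (a : Int) (t : List Int) :
    get_lick_block_types (a :: t) = get_lick_block_types_alt (a :: t) := by
  have hB : get_lick_block_types_alt (a :: t)
      = ((if a = 1 then "left" else "right") :: (altGo (a :: t) (skipRun (a :: t) a 1)).1,
         (1 : Int) :: (altGo (a :: t) (skipRun (a :: t) a 1)).2) := by
    rw [get_lick_block_types_alt, altGo, dif_pos (by simp)]
    simp
  have hR : aRun (a :: t) a 1 = altGo (a :: t) (skipRun (a :: t) a 1) :=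
    aRun_eq_altGo (a :: t) a 1 (le_refl 1)
  rw [hB, ← hR]
  show (match (a :: t : List Int) with
    | [] => (([], [1]) : List String × List Int)
    | first_bl :: _ =>
      let list_of_lick_blocks : List String := [if first_bl = 1 then "left" else "right"]
      let list_of_lick_blocks_x : List Int := [1]
      if (a :: t).length > 1 then
        (PySem.List.enumerate (a :: t) 0).foldl (aStep (a :: t))
          (list_of_lick_blocks, list_of_lick_blocks_x)
      else (list_of_lick_blocks, list_of_lick_blocks_x)) = _
  simp only []
  by_cases hlen : (a :: t).length > 1
  · rw [if_pos hlen]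
    rw [foldl_aStep]
    have henum : (PySem.List.enumerate (a :: t) 0) = (0, a) :: PySem.List.enumerate t 1 :=
      PySem.List.enumerate_cons a t 0
    have hdrop : PySem.List.enumerate t 1 = (PySem.List.enumerate (a :: t) 0).drop 1 := by
      rw [henum]; rfl
    have h0 : aP (a :: t) ((0, a) :: PySem.List.enumerate t 1) = aP (a :: t) (PySem.List.enumerate t 1) := by
      simp [aP]
    rw [henum, h0, hdrop, aP_drop (a :: t) 1 (le_refl 1)]
    simp
  · rw [if_neg hlen]
    have ht : t = [] := by
      cases t with
      | nil => rfl
      | cons b tb => simp at hlen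
    subst ht
    have : aRun [a] a 1 = ([], []) := by
      rw [aRun, dif_neg (by simp)]
    rw [this]

-- ===== VERDICT (by name: the statement is the Claim_ definition above) =====
theorem get_lick_block_types_spec : Claim_equal_get_lick_block_types := by
  intro l _ hpre
  cases l with
  | nil => exact absurd rfl hpre
  | cons a t => exact main_eq a t
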